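-- pv_equiv track=rewrite | github.com/alex-l-young/urbansurge | src/urbansurge/sensor_network.py | assign_elevation_sensor_nodes
-- ===== SOURCE A (Python) =====
-- from typing import List, Dict
--
-- def assign_elevation_sensor_nodes(exceed_all: dict, n_min=0) -> List[str]:
--     """
--     Assign sensor nodes based on a greedy algorithm.
--     1. First sensor is node with largest fov.
--     2. That node and all nodes in fov are removed from contention.
--     3. Repeat.
--
--     :param exceed_all: Dictionary with node names as keys and fov dictionarys as values.
--     :param n_min: Minimum number of nodes allowed in an fov.
--
--     :return: List of sensor nodes.
--     """
--     sensor_nodes = []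
--     exceed_counts = compute_exceed_counts(exceed_all)
--
--     while exceed_counts:
--         max_node = max(exceed_counts, key=exceed_counts.get)
--
--         # Test whether max_node has more than n_min in its FOV.
--         if exceed_counts[max_node] < n_min:
--             break
--
--         sensor_nodes.append(max_node)
--
--         # Nodes in sensor field of view.
--         fov_nodes = list(exceed_all[max_node].keys())
--         fov_nodes.append(max_node)
--
--         # Remove top-level keys that are in fov_nodes
--         exceed_all = {k: v for k, v in exceed_all.items() if k not in fov_nodes}
--
--         # Remove keys in fov_nodes from the sub-dictionaries
--         for key, sub_dict in exceed_all.items():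
--             exceed_all[key] = {sub_k: sub_v for sub_k, sub_v in sub_dict.items() if sub_k not in fov_nodes}
--
--         # Recompute exceed_counts.
--         exceed_counts = compute_exceed_counts(exceed_all)
--
--     return sensor_nodes
--
-- def compute_exceed_counts(exceed_all):
--     """
--     Counts the number of nodes in each node's FoV.
--
--     :param exceed_all: Dictionary containing all nodes and the downstream FoVs.
--     :return: Dictionary with keys as node names and values as FoV counts.
--     """
--     exceed_counts = {}
--     for node, exceed_node_dict in exceed_all.items():
--         exceed_counts[node] = len(exceed_node_dict.keys())
--
--     return exceed_counts
-- ===== SOURCE B (Python) =====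
-- from typing import List
--
-- def assign_elevation_sensor_nodes(exceed_all: dict, n_min=0) -> List[str]:
--     # Alternative algorithm: reverse index + incremental count maintenance; counts are
--     # updated when nodes are removed instead of being recomputed from rebuilt dictionaries.
--     nodes = list(exceed_all.keys())
--     fov = {k: list(v.keys()) for k, v in exceed_all.items()}
--     pairs = [(x, k) for k in nodes for x in fov[k]]
--     rev = {}
--     for x, k in pairs:
--         rev.setdefault(x, []).append(k)
--     cnt = {k: len(fov[k]) for k in nodes}
--     removed = set()
--     sensor_nodes = []
--     while True:
--         best = None
--         best_count = -1
--         for k in nodes: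
--             if k not in removed and cnt[k] > best_count:
--                 best = k
--                 best_count = cnt[k]
--         if best is None or best_count < n_min:
--             break
--         sensor_nodes.append(best)
--         for r in fov[best] + [best]:
--             if r not in removed:
--                 removed.add(r)
--                 for k in rev.get(r, []):
--                     cnt[k] -= 1
--     return sensor_nodes
-- ===== Notes on version B (the rewrite author's own statement) =====
-- stated objective: alternative
-- what changed: Instead of rebuilding the nested dictionaries and recomputing all FoV counts after every selection, B builds a reverse index (node -> nodes whose FoV contains it) once, keeps a removed set, and decrements the affected counts incrementally; the max scan over alive nodes in original order reproduces A's first-max tie-break.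
import Mathlib
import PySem

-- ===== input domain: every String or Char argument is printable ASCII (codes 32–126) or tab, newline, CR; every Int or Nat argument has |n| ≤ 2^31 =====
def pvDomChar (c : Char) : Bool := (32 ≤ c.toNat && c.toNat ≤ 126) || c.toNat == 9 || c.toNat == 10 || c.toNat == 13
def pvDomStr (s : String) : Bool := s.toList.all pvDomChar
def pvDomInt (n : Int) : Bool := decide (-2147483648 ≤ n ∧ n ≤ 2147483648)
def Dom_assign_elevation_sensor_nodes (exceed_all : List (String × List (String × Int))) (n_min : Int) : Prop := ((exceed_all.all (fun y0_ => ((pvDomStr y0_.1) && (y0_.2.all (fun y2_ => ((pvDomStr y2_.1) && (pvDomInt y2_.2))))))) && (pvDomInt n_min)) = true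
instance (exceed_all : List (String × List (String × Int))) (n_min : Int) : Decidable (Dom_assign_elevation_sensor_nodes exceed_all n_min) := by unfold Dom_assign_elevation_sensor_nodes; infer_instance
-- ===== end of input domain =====

-- ===== PORT A =====
-- B replaces per-round dictionary rebuilding/recounting by a reverse index with
-- incrementally maintained FoV counts (objective: alternative algorithm, same result).
-- Both ports read the association-list argument as Python builds a dict from it.
def pvDictA (exceed_all : List (String × List (String × Int))) : PySem.Dict String (PySem.Dict String Int) :=
  PySem.Dict.ofList (exceed_all.map (fun p => (p.1, PySem.Dict.ofList p.2)))

def compute_exceed_counts (d : PySem.Dict String (PySem.Dict String Int)) : PySem.Dict String Int :=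
  d.items.foldl (fun c p => c.insert p.1 (PySem.List.len p.2.keys)) PySem.Dict.empty

def pvLoopA (fuel : Nat) (exceed_all : PySem.Dict String (PySem.Dict String Int)) (n_min : Int) (sensor_nodes : List String) : List String :=
  match fuel with
  | 0 => sensor_nodes
  | fuel + 1 =>
    let exceed_counts := compute_exceed_counts exceed_all
    -- while exceed_counts: an empty dict is falsy; max(…, key=exceed_counts.get)
    match PySem.List.max? exceed_counts.keys (fun k => exceed_counts.getD k 0) with
    | none => sensor_nodes
    | some max_node =>
      if exceed_counts.getD max_node 0 < n_min then sensor_nodes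
      else
        let fov_nodes := (exceed_all.getD max_node PySem.Dict.empty).keys ++ [max_node]
        let exceed_all1 : PySem.Dict String (PySem.Dict String Int) :=
          PySem.Dict.mk (exceed_all.items.filter (fun p => !(fov_nodes.contains p.1)))
        let exceed_all2 : PySem.Dict String (PySem.Dict String Int) :=
          PySem.Dict.mk (exceed_all1.items.map (fun p =>
            (p.1, PySem.Dict.mk (p.2.items.filter (fun q => !(fov_nodes.contains q.1))))))
        pvLoopA fuel exceed_all2 n_min (sensor_nodes ++ [max_node])

def assign_elevation_sensor_nodes (exceed_all : List (String × List (String × Int))) (n_min : Int) : List String :=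
  pvLoopA (exceed_all.length + 1) (pvDictA exceed_all) n_min []

-- ===== PORT B =====
def pvScanB (nodes : List String) (removed : PySem.Set String) (cnt : PySem.Dict String Int) : Option String × Int :=
  nodes.foldl (fun acc k =>
    if !(PySem.Set.contains removed k) && decide (cnt.getD k 0 > acc.2) then (some k, cnt.getD k 0) else acc)
    ((none : Option String), (-1 : Int))

def pvRemoveB (rev : PySem.Dict String (List String)) (rc : PySem.Set String × PySem.Dict String Int) (r : String) : PySem.Set String × PySem.Dict String Int :=
  if PySem.Set.contains rc.1 r then rc
  else (PySem.Set.add rc.1 r, (rev.getD r []).foldl (fun c k => c.modify k 0 (· - 1)) rc.2)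

def pvLoopB (nodes : List String) (fov rev : PySem.Dict String (List String)) (n_min : Int) :
    Nat → PySem.Set String → PySem.Dict String Int → List String → List String
  | 0, _, _, sensor_nodes => sensor_nodes
  | fuel + 1, removed, cnt, sensor_nodes =>
    match pvScanB nodes removed cnt with
    | (none, _) => sensor_nodes
    | (some best, best_count) =>
      if best_count < n_min then sensor_nodes
      else
        let rc := (fov.getD best [] ++ [best]).foldl (pvRemoveB rev) (removed, cnt)
        pvLoopB nodes fov rev n_min fuel rc.1 rc.2 (sensor_nodes ++ [best])

def assign_elevation_sensor_nodes_alt (exceed_all : List (String × List (String × Int))) (n_min : Int) : List String :=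
  let d := pvDictA exceed_all
  let nodes := d.keys
  let fov : PySem.Dict String (List String) :=
    d.items.foldl (fun f p => f.insert p.1 p.2.keys) PySem.Dict.empty
  let pairs := nodes.flatMap (fun k => (fov.getD k []).map (fun x => (x, k)))
  let rev : PySem.Dict String (List String) :=
    pairs.foldl (fun r p => (r.setdefault p.1 []).modify p.1 [] (· ++ [p.2])) PySem.Dict.empty
  let cnt : PySem.Dict String Int :=
    nodes.foldl (fun c k => c.insert k (PySem.List.len (fov.getD k []))) PySem.Dict.empty
  pvLoopB nodes fov rev n_min (exceed_all.length + 1) PySem.Set.empty cnt []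

-- ===== PRECONDITION & SPEC =====
def Spec_assign_elevation_sensor_nodes (exceed_all : List (String × List (String × Int))) (n_min : Int) (out : List String) : Prop := out = assign_elevation_sensor_nodes_alt exceed_all n_min
instance (exceed_all : List (String × List (String × Int))) (n_min : Int) (out : List String) : Decidable (Spec_assign_elevation_sensor_nodes exceed_all n_min out) := by unfold Spec_assign_elevation_sensor_nodes; infer_instance

-- ===== CLAIM (what is proved, stated in full; the proofs are below) =====
def Claim_equal_assign_elevation_sensor_nodes : Prop := ∀ (exceed_all : List (String × List (String × Int))) (n_min : Int), Dom_assign_elevation_sensor_nodes exceed_all n_min → Spec_assign_elevation_sensor_nodes exceed_all n_min (assign_elevation_sensor_nodes exceed_all n_min)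


-- ===== LEMMAS AND PROOFS =====
-- Proof-only abbreviations: the state of A's loop as a filter of the original dict.
def pvSub (R : List String) (s : PySem.Dict String Int) : PySem.Dict String Int :=
  PySem.Dict.mk (s.items.filter (fun q => !(R.contains q.1)))

def pvFilter (R : List String) (D : PySem.Dict String (PySem.Dict String Int)) : PySem.Dict String (PySem.Dict String Int) :=
  PySem.Dict.mk ((D.items.filter (fun p => !(R.contains p.1))).map (fun p => (p.1, pvSub R p.2)))

def pvFov (D : PySem.Dict String (PySem.Dict String Int)) (k : String) : List String :=
  (D.getD k PySem.Dict.empty).keys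

def pvV (D : PySem.Dict String (PySem.Dict String Int)) (R : List String) (k : String) : Int :=
  (((pvFov D k).filter (fun x => !(R.contains x))).length : Int)

-- the running maximum of Python's max(..., key=...) (first maximal element)
def pvRun (v : String → Int) (l : List String) (m : String) : String :=
  l.foldl (fun mm x => if v mm < v x then x else mm) m

lemma pv_flatMap_if (l : List String) (p : String → Bool) :
    l.flatMap (fun k => if p k then [k] else []) = l.filter p := by
  induction l with
  | nil => rfl
  | cons a t ih => by_cases h : p a = true <;> simp [List.flatMap_cons, h, ih]

lemma pv_filter_beq (f : List String) (hf : f.Nodup) (r : String) :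
    f.filter (fun x => x == r) = if f.contains r then [r] else [] := by
  induction f with
  | nil => simp
  | cons a t ih =>
    rcases List.nodup_cons.mp hf with ⟨ha, ht⟩
    by_cases h : a = r
    · subst h
      have : t.filter (fun x => x == a) = [] := by
        rw [ih ht]; simp [ha]
      simp [this]
    · have : (a == r) = false := by simp [h]
      simp only [List.filter_cons, this, List.contains_cons, ih ht]
      have hra : ¬ r = a := fun e => h e.symm
      simp [beq_iff_eq, hra]

lemma pv_run_mem (v : String → Int) : ∀ (l : List String) (m : String), pvRun v l m ∈ m :: l := by
  intro l
  induction l with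
  | nil => intro m; simp [pvRun]
  | cons a t ih =>
    intro m
    simp only [pvRun, List.foldl_cons]
    by_cases h : v m < v a
    · have := ih a; simp only [pvRun] at this
      rw [if_pos h]
      rcases List.mem_cons.mp this with h' | h' <;> simp [h']
    · have := ih m; simp only [pvRun] at this
      rw [if_neg h]
      rcases List.mem_cons.mp this with h' | h' <;> simp [h']

lemma pv_run_congr (v w : String → Int) : ∀ (l : List String) (m : String),
    (∀ x ∈ m :: l, v x = w x) → pvRun v l m = pvRun w l m := by
  intro l
  induction l with
  | nil => intro m _; rfl
  | cons a t ih =>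
    intro m h
    simp only [pvRun, List.foldl_cons]
    have hm := h m (by simp)
    have ha := h a (by simp)
    rw [hm, ha]
    by_cases hc : w m < w a
    · rw [if_pos hc]
      exact ih a (fun x hx => h x (by rcases List.mem_cons.mp hx with h' | h' <;> simp [h']))
    · rw [if_neg hc]
      exact ih m (fun x hx => h x (by rcases List.mem_cons.mp hx with h' | h' <;> simp [h']))

-- Python's max(l, key=v) as a running maximum
lemma pv_max_cons (v : String → Int) (k : String) (t : List String) :
    PySem.List.max? (k :: t) v = some (pvRun v t k) := by
  simp only [PySem.List.max?, List.foldl_cons]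
  induction t generalizing k with
  | nil => rfl
  | cons a t ih =>
    simp only [List.foldl_cons, pvRun]
    by_cases h : v k < v a
    · rw [if_pos h]
      have := ih a; simp only [pvRun] at this; rw [this]; simp [h]
    · rw [if_neg h]
      have := ih k; simp only [pvRun] at this; rw [this]; simp [h]

-- B's sentinel scan as the same running maximum
lemma pv_scan_run (v : String → Int) : ∀ (l : List String) (m : String),
    l.foldl (fun acc k => if decide (v k > acc.2) then (some k, v k) else acc) (some m, v m)
      = (some (pvRun v l m), v (pvRun v l m)) := by
  intro l
  induction l with
  | nil => intro m; rfl
  | cons a t ih =>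
    intro m
    simp only [List.foldl_cons, pvRun]
    by_cases h : v m < v a
    · rw [if_pos (by simpa using h)]
      have := ih a; simp only [pvRun] at this; rw [this]; simp [h]
    · rw [if_neg (by simpa using h)]
      have := ih m; simp only [pvRun] at this; rw [this]; simp [h]

lemma pv_scan_cons (v : String → Int) (k : String) (t : List String) (hv : 0 ≤ v k) :
    (k :: t).foldl (fun acc k => if decide (v k > acc.2) then (some k, v k) else acc)
      ((none : Option String), (-1 : Int))
      = (some (pvRun v t k), v (pvRun v t k)) := by
  simp only [List.foldl_cons]
  rw [if_pos (by simp; omega)]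
  exact pv_scan_run v t k

-- keys of the filtered dictionaries
lemma pv_keys_sub (R : List String) (s : PySem.Dict String Int) :
    (pvSub R s).keys = s.keys.filter (fun x => !(R.contains x)) := by
  simp only [pvSub, PySem.Dict.keys]
  exact (List.filter_map (p := fun x => !(R.contains x)) (f := Prod.fst)).symm ▸ rfl

lemma pv_filter_items (R : List String) (D : PySem.Dict String (PySem.Dict String Int)) :
    (pvFilter R D).items = (D.items.filter (fun p => !(R.contains p.1))).map (fun p => (p.1, pvSub R p.2)) := rfl

lemma pv_keys_filter (R : List String) (D : PySem.Dict String (PySem.Dict String Int)) :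
    (pvFilter R D).keys = D.keys.filter (fun k => !(R.contains k)) := by
  simp only [pvFilter, PySem.Dict.keys, List.map_map]
  have : (Prod.fst ∘ fun p : String × PySem.Dict String Int => (p.1, pvSub R p.2)) = Prod.fst := rfl
  rw [this]
  exact (List.filter_map (p := fun x => !(R.contains x)) (f := Prod.fst)).symm ▸ rfl

lemma pv_mem_keys_item {D : PySem.Dict String (PySem.Dict String Int)} {k : String}
    (h : k ∈ D.keys) : ∃ s, (k, s) ∈ D.items := by
  simp only [PySem.Dict.keys, List.mem_map] at h
  obtain ⟨p, hp, he⟩ := h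
  exact ⟨p.2, by simpa [← he] using hp⟩

lemma pv_nodup_keys_filter {D : PySem.Dict String (PySem.Dict String Int)} (hnd : D.keys.Nodup)
    (R : List String) : (pvFilter R D).keys.Nodup := by
  rw [pv_keys_filter]; exact List.Nodup.filter _ hnd

lemma pv_getD_filter {D : PySem.Dict String (PySem.Dict String Int)} (hnd : D.keys.Nodup)
    (R : List String) {k : String} (hk : k ∈ D.keys) (hkR : R.contains k = false) :
    (pvFilter R D).getD k PySem.Dict.empty = pvSub R (D.getD k PySem.Dict.empty) := by
  obtain ⟨s, hs⟩ := pv_mem_keys_item hk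
  have hD : D.getD k PySem.Dict.empty = s := PySem.Dict.getD_of_mem_items _ hs hnd _
  have hmem : (k, pvSub R s) ∈ (pvFilter R D).items := by
    rw [pv_filter_items]
    exact List.mem_map.mpr ⟨(k, s), List.mem_filter.mpr ⟨hs, by simpa using hkR⟩, rfl⟩
  rw [PySem.Dict.getD_of_mem_items _ hmem (pv_nodup_keys_filter hnd R) _, hD]

-- items of compute_exceed_counts
lemma pv_counts_items (d : PySem.Dict String (PySem.Dict String Int)) (h : d.keys.Nodup) :
    (compute_exceed_counts d).items = d.items.map (fun p => (p.1, PySem.List.len p.2.keys)) := by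
  simp only [compute_exceed_counts]
  rw [PySem.Dict.items_foldl_insert_fresh d.items Prod.fst (fun p => PySem.List.len p.2.keys)
    PySem.Dict.empty (by intro a _; simp [PySem.Dict.contains_empty]) h]
  simp [PySem.Dict.empty]

lemma pv_counts_keys (d : PySem.Dict String (PySem.Dict String Int)) (h : d.keys.Nodup) :
    (compute_exceed_counts d).keys = d.keys := by
  simp only [PySem.Dict.keys, pv_counts_items d h, List.map_map]
  rfl

lemma pv_counts_getD (d : PySem.Dict String (PySem.Dict String Int)) (h : d.keys.Nodup)
    {k : String} {s : PySem.Dict String Int} (hks : (k, s) ∈ d.items) :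
    (compute_exceed_counts d).getD k 0 = PySem.List.len s.keys := by
  have hmem : (k, PySem.List.len s.keys) ∈ (compute_exceed_counts d).items := by
    rw [pv_counts_items d h]
    exact List.mem_map.mpr ⟨(k, s), hks, rfl⟩
  have hnd : (compute_exceed_counts d).keys.Nodup := by rw [pv_counts_keys d h]; exact h
  exact PySem.Dict.getD_of_mem_items _ hmem hnd _

-- counts of the filtered dict are the surviving-FoV sizes
lemma pv_counts_filter_getD {D : PySem.Dict String (PySem.Dict String Int)} (hnd : D.keys.Nodup)
    (R : List String) {k : String} (hk : k ∈ D.keys) (hkR : R.contains k = false) :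
    (compute_exceed_counts (pvFilter R D)).getD k 0 = pvV D R k := by
  have hnd' := pv_nodup_keys_filter hnd R
  have hk' : k ∈ (pvFilter R D).keys := by
    rw [pv_keys_filter]; exact List.mem_filter.mpr ⟨hk, by simpa using hkR⟩
  obtain ⟨s, hs⟩ := pv_mem_keys_item hk'
  have hgd : (pvFilter R D).getD k PySem.Dict.empty = s := PySem.Dict.getD_of_mem_items _ hs hnd' _
  rw [pv_counts_getD _ hnd' hs]
  rw [← hgd, pv_getD_filter hnd R hk hkR, pv_keys_sub]
  simp [pvV, pvFov, PySem.List.len]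

-- a fold of "cnt[k] -= 1" subtracts the number of occurrences
lemma pv_foldl_modify_sub_one : ∀ (l : List String) (c : PySem.Dict String Int) (v : String),
    (l.foldl (fun c k => c.modify k 0 (· - 1)) c).getD v 0 = c.getD v 0 - l.count v := by
  intro l
  induction l with
  | nil => intro c v; simp
  | cons a t ih =>
    intro c v
    simp only [List.foldl_cons, ih, PySem.Dict.getD_modify, List.count_cons]
    by_cases h : v = a
    · subst h; simp; omega
    · have : (a == v) = false := by simp; exact fun e => h e.symm
      simp [h, this]

-- removing one fresh element from the removed set drops a nodup FoV's count by its membership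
lemma pv_filter_erase_len (r : String) (p : String → Bool) (hp : p r = true) :
    ∀ (f : List String), f.Nodup →
      ((f.filter (fun x => p x && !(x == r))).length : Int)
        = (f.filter p).length - (if f.contains r then 1 else 0) := by
  intro f
  induction f with
  | nil => simp
  | cons a t ih =>
    intro hf
    rcases List.nodup_cons.mp hf with ⟨ha, ht⟩
    by_cases h : a = r
    · subst h
      have hc : t.contains a = false := by simpa using ha
      have hgoal := ih ht
      rw [hc] at hgoal
      simp only [List.filter_cons, List.contains_cons, BEq.rfl, Bool.true_or, if_true]
      rw [hp]
      simp only [Bool.not_true, Bool.and_false]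
      rw [if_neg (by simp), hgoal]
      simp
    · have h2 : (a == r) = false := by simp [h]
      have hcc : (t.contains r) = (a :: t).contains r := by
        have : ¬ r = a := fun e => h e.symm
        simp [this]
      simp only [List.filter_cons, h2, Bool.not_false, Bool.and_true]
      rw [← hcc]
      by_cases hpa : p a = true
      · rw [if_pos hpa, if_pos hpa]
        simp only [List.length_cons]
        have h3 := ih ht
        by_cases hm : t.contains r = true
        · rw [hm, if_pos rfl] at h3 ⊢; push_cast at h3 ⊢; omega
        · rw [eq_false_of_ne_true hm] at h3 ⊢
          rw [if_neg (by simp)] at h3 ⊢; push_cast at h3 ⊢; omega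
      · rw [if_neg hpa, if_neg hpa, ih ht]

-- first component of B's removal fold is a plain Set.add fold
lemma pv_remove_fst (rev : PySem.Dict String (List String)) :
    ∀ (L : List String) (R : PySem.Set String) (cnt : PySem.Dict String Int),
      (L.foldl (pvRemoveB rev) (R, cnt)).1 = L.foldl PySem.Set.add R := by
  intro L
  induction L with
  | nil => intros; rfl
  | cons a t ih =>
    intro R cnt
    simp only [List.foldl_cons, pvRemoveB]
    by_cases h : PySem.Set.contains R a = true
    · rw [if_pos h]
      have : PySem.Set.add R a = R := PySem.Set.add_of_mem ((PySem.Set.contains_iff R a).mp h)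
      rw [this]; exact ih R cnt
    · rw [if_neg h]; exact ih _ _

lemma pv_mem_foldl_add (L : List String) (R : PySem.Set String) (y : String) :
    y ∈ L.foldl PySem.Set.add R ↔ y ∈ R ∨ y ∈ L := by
  have := PySem.Set.mem_foldl_add L (fun x => x) R y
  simpa using this

lemma pv_V_append (D0 : PySem.Dict String (PySem.Dict String Int)) (R : List String) (k r : String)
    (hsub : (pvFov D0 k).Nodup) (hrR : r ∉ R) :
    pvV D0 (R ++ [r]) k = pvV D0 R k - (if (pvFov D0 k).contains r then 1 else 0) := by
  have hpred : (fun x => !((R ++ [r]).contains x)) = (fun x => (!(R.contains x)) && !(x == r)) := by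
    funext x
    by_cases hx : x = r
    · subst hx
      simp [hrR]
    · simp [hx]
  simp only [pvV, hpred]
  exact pv_filter_erase_len r (fun x => !(R.contains x)) (by simp [hrR]) _ hsub

lemma pv_remove_inv (D0 : PySem.Dict String (PySem.Dict String Int))
    (rev : PySem.Dict String (List String))
    (hsub : ∀ k, (pvFov D0 k).Nodup)
    (hrev : ∀ r k, k ∈ D0.keys →
      ((rev.getD r []).count k : Int) = if (pvFov D0 k).contains r then 1 else 0) :
    ∀ (L : List String) (R : PySem.Set String) (cnt : PySem.Dict String Int),
      (∀ k ∈ D0.keys, cnt.getD k 0 = pvV D0 R k) →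
      ∀ k ∈ D0.keys,
        ((L.foldl (pvRemoveB rev) (R, cnt)).2).getD k 0
          = pvV D0 ((L.foldl (pvRemoveB rev) (R, cnt)).1) k := by
  intro L
  induction L with
  | nil => intro R cnt hinv k hk; exact hinv k hk
  | cons a t ih =>
    intro R cnt hinv k hk
    simp only [List.foldl_cons, pvRemoveB]
    by_cases h : PySem.Set.contains R a = true
    · rw [if_pos h]
      exact ih R cnt hinv k hk
    · rw [if_neg h]
      have hna : a ∉ R := by
        intro hm
        exact h ((PySem.Set.contains_iff R a).mpr hm)
      have hadd : PySem.Set.add R a = R ++ [a] := PySem.Set.add_of_not_mem hna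
      refine ih _ _ ?_ k hk
      intro k' hk'
      rw [pv_foldl_modify_sub_one, hinv k' hk', hrev a k' hk', hadd]
      exact (pv_V_append D0 R k' a (hsub k') hna).symm

-- Python's rev.setdefault(x, []).append(k) is a plain modify
lemma pv_setdefault_modify (d : PySem.Dict String (List String)) (x : String) (f : List String → List String) :
    (d.setdefault x []).modify x [] f = d.modify x [] f := by
  by_cases h : d.contains x = true
  · rw [PySem.Dict.setdefault_of_contains d [] h]
  · rw [PySem.Dict.setdefault_of_not_contains d [] (eq_false_of_ne_true h)]
    simp only [PySem.Dict.modify]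
    rw [PySem.Dict.getD_insert_self, PySem.Dict.insert_insert_self,
      PySem.Dict.getD_of_not_contains d [] (eq_false_of_ne_true h)]

lemma pv_rev_getD (pairs : List (String × String)) (r : String) :
    ((pairs.foldl (fun rv p => (rv.setdefault p.1 []).modify p.1 [] (· ++ [p.2])) PySem.Dict.empty).getD r [])
      = (pairs.filter (fun p => p.1 == r)).map (fun p => p.2) := by
  rw [PySem.List.foldl_congr_mem' pairs _ (fun d p => d.modify p.1 [] (fun x => x ++ [p.2])) _
    (fun p _ acc => pv_setdefault_modify acc p.1 _)]
  rw [PySem.Dict.getD_foldl_modify_append]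
  simp [PySem.Dict.getD_empty]

-- the fov dictionary built in B
lemma pv_fovd_getD (D0 : PySem.Dict String (PySem.Dict String Int)) (hnd : D0.keys.Nodup)
    {k : String} (hk : k ∈ D0.keys) :
    ((D0.items.foldl (fun f p => f.insert p.1 p.2.keys) PySem.Dict.empty).getD k []) = pvFov D0 k := by
  obtain ⟨s, hs⟩ := pv_mem_keys_item hk
  have hitems : (D0.items.foldl (fun f p => f.insert p.1 p.2.keys) PySem.Dict.empty).items
      = D0.items.map (fun p => (p.1, p.2.keys)) := by
    rw [PySem.Dict.items_foldl_insert_fresh D0.items Prod.fst (fun p => p.2.keys)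
      PySem.Dict.empty (by intro a _; simp [PySem.Dict.contains_empty]) hnd]
    simp [PySem.Dict.empty]
  have hkeys : (D0.items.foldl (fun f p => f.insert p.1 p.2.keys) PySem.Dict.empty).keys = D0.keys := by
    show (D0.items.foldl (fun f p => f.insert p.1 p.2.keys) PySem.Dict.empty).items.map (fun x => x.1)
      = D0.items.map (fun x => x.1)
    rw [hitems, List.map_map]; rfl
  have hmem : (k, s.keys) ∈ (D0.items.foldl (fun f p => f.insert p.1 p.2.keys) PySem.Dict.empty).items := by
    rw [hitems]; exact List.mem_map.mpr ⟨(k, s), hs, rfl⟩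
  rw [PySem.Dict.getD_of_mem_items _ hmem (by rw [hkeys]; exact hnd) _]
  simp [pvFov, PySem.Dict.getD_of_mem_items _ hs hnd]

-- sub-dictionaries of a dict built from ofList values have duplicate-free keys
lemma pv_foldl_insert_values_nodup :
    ∀ (l : List (String × PySem.Dict String Int)) (d : PySem.Dict String (PySem.Dict String Int)),
      (∀ p ∈ d.items, p.2.keys.Nodup) → (∀ q ∈ l, q.2.keys.Nodup) →
      ∀ p ∈ (l.foldl (fun acc q => acc.insert q.1 q.2) d).items, p.2.keys.Nodup := by
  intro l
  induction l with
  | nil => intro d hd _ p hp; exact hd p hp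
  | cons a t ih =>
    intro d hd hl p hp
    refine ih (d.insert a.1 a.2) ?_ (fun q hq => hl q (List.mem_cons_of_mem _ hq)) p (by simpa using hp)
    intro q hq
    rcases (PySem.Dict.mem_items_insert d a.1 a.2 q).mp hq with h | ⟨h, _⟩
    · rw [h]; exact hl a (List.mem_cons_self)
    · exact hd q h

lemma pv_sub_nodup (exceed_all : List (String × List (String × Int))) :
    ∀ k, (pvFov (pvDictA exceed_all) k).Nodup := by
  intro k
  cases h : (pvDictA exceed_all).get? k with
  | none =>
    simp only [pvFov, PySem.Dict.getD, h, Option.getD_none]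
    simp [PySem.Dict.empty, PySem.Dict.keys]
  | some s =>
    simp only [pvFov, PySem.Dict.getD, h, Option.getD_some]
    have hmem : (k, s) ∈ (pvDictA exceed_all).items := PySem.Dict.mem_items_of_get?_eq_some _ h
    have : ∀ p ∈ (pvDictA exceed_all).items, p.2.keys.Nodup := by
      simp only [pvDictA, PySem.Dict.ofList, PySem.Dict.update]
      refine pv_foldl_insert_values_nodup _ PySem.Dict.empty (by simp [PySem.Dict.empty]) ?_
      intro q hq
      obtain ⟨p, _, he⟩ := List.mem_map.mp hq
      rw [← he]
      exact PySem.Dict.nodup_keys_ofList p.2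
    exact this (k, s) hmem

-- the reverse index holds each node at most once per FoV member
lemma pv_rev_count (D0 : PySem.Dict String (PySem.Dict String Int)) (hnd : D0.keys.Nodup)
    (hsub : ∀ k, (pvFov D0 k).Nodup)
    (fovd : PySem.Dict String (List String)) (hfov : ∀ k ∈ D0.keys, fovd.getD k [] = pvFov D0 k)
    (r k : String) (hk : k ∈ D0.keys) :
    ((((D0.keys.flatMap (fun k => (fovd.getD k []).map (fun x => (x, k)))).foldl
        (fun rv p => (rv.setdefault p.1 []).modify p.1 [] (· ++ [p.2])) PySem.Dict.empty).getD r []).count k : Int)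
      = if (pvFov D0 k).contains r then 1 else 0 := by
  rw [pv_rev_getD]
  have hinner : ∀ k' ∈ D0.keys,
      (((fovd.getD k' []).map (fun x => (x, k'))).filter (fun p => p.1 == r)).map (fun p => p.2)
        = if (pvFov D0 k').contains r then [k'] else [] := by
    intro k' hk'
    rw [hfov k' hk']
    rw [List.filter_map, List.map_map]
    have : ((fun p : String × String => p.1 == r) ∘ fun x => (x, k')) = (fun x => x == r) := rfl
    rw [this, pv_filter_beq (pvFov D0 k') (hsub k') r]
    by_cases h : r ∈ pvFov D0 k' <;> simp [h]
  have hlist : (((D0.keys.flatMap (fun k => (fovd.getD k []).map (fun x => (x, k)))).filter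
        (fun p => p.1 == r)).map (fun p : String × String => p.2))
      = D0.keys.filter (fun k => (pvFov D0 k).contains r) := by
    rw [List.filter_flatMap, List.map_flatMap, ← pv_flatMap_if D0.keys (fun k => (pvFov D0 k).contains r)]
    exact List.flatMap_congr hinner
  rw [hlist]
  have hndf : (D0.keys.filter (fun k => (pvFov D0 k).contains r)).Nodup := List.Nodup.filter _ hnd
  by_cases h : (pvFov D0 k).contains r = true
  · rw [if_pos h]
    have : k ∈ D0.keys.filter (fun k => (pvFov D0 k).contains r) := List.mem_filter.mpr ⟨hk, h⟩
    rw [List.count_eq_one_of_mem hndf this]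
    rfl
  · rw [if_neg h]
    have : k ∉ D0.keys.filter (fun k => (pvFov D0 k).contains r) := by
      intro hm
      exact h (List.mem_filter.mp hm).2
    rw [List.count_eq_zero.mpr this]
    rfl

-- filtering by the empty removed set is the identity
lemma pv_filter_nil (D : PySem.Dict String (PySem.Dict String Int)) : pvFilter [] D = D := by
  apply PySem.Dict.ext
  rw [pv_filter_items]
  simp [pvSub]

-- the initial count dictionary
lemma pv_cnt0 (D0 : PySem.Dict String (PySem.Dict String Int)) (hnd : D0.keys.Nodup)
    (fovd : PySem.Dict String (List String)) (hfov : ∀ k ∈ D0.keys, fovd.getD k [] = pvFov D0 k)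
    {k : String} (hk : k ∈ D0.keys) :
    ((D0.keys.foldl (fun c k => c.insert k (PySem.List.len (fovd.getD k []))) PySem.Dict.empty).getD k 0)
      = pvV D0 [] k := by
  have hitems : (D0.keys.foldl (fun c k => c.insert k (PySem.List.len (fovd.getD k []))) PySem.Dict.empty).items
      = D0.keys.map (fun k => (k, PySem.List.len (fovd.getD k []))) := by
    rw [PySem.Dict.items_foldl_insert_fresh D0.keys (fun k => k) (fun k => PySem.List.len (fovd.getD k []))
      PySem.Dict.empty (by intro a _; simp [PySem.Dict.contains_empty]) (by simpa using hnd)]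
    simp [PySem.Dict.empty]
  have hkeys : (D0.keys.foldl (fun c k => c.insert k (PySem.List.len (fovd.getD k []))) PySem.Dict.empty).keys.Nodup := by
    show ((D0.keys.foldl (fun c k => c.insert k (PySem.List.len (fovd.getD k []))) PySem.Dict.empty).items.map (fun x => x.1)).Nodup
    rw [hitems, List.map_map]
    simpa [Function.comp_def] using hnd
  have hmem : (k, PySem.List.len (fovd.getD k [])) ∈
      (D0.keys.foldl (fun c k => c.insert k (PySem.List.len (fovd.getD k []))) PySem.Dict.empty).items := by
    rw [hitems]; exact List.mem_map.mpr ⟨k, hk, rfl⟩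
  rw [PySem.Dict.getD_of_mem_items _ hmem hkeys _, hfov k hk]
  simp [pvV, PySem.List.len]

-- one removal round of A, seen as a filter of the original dictionary
lemma pv_step_eq (D0 : PySem.Dict String (PySem.Dict String Int)) (hnd : D0.keys.Nodup)
    (R : List String) (b : String) (hb : b ∈ D0.keys) (hbR : R.contains b = false)
    (R' : List String)
    (hR' : ∀ x, x ∈ R' ↔ (x ∈ R ∨ x ∈ pvFov D0 b ∨ x = b)) :
    PySem.Dict.mk (((PySem.Dict.mk ((pvFilter R D0).items.filter
        (fun p => !((((pvFilter R D0).getD b PySem.Dict.empty).keys ++ [b]).contains p.1)))).items).map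
      (fun p => (p.1, PySem.Dict.mk (p.2.items.filter
        (fun q => !((((pvFilter R D0).getD b PySem.Dict.empty).keys ++ [b]).contains q.1))))))
      = pvFilter R' D0 := by
  have hfovn : ((pvFilter R D0).getD b PySem.Dict.empty).keys
      = (pvFov D0 b).filter (fun x => !(R.contains x)) := by
    rw [pv_getD_filter hnd R hb hbR, pv_keys_sub]; rfl
  set FN := ((pvFilter R D0).getD b PySem.Dict.empty).keys ++ [b] with hFN
  have hmemFN : ∀ x, x ∈ FN ↔ ((x ∈ pvFov D0 b ∧ x ∉ R) ∨ x = b) := by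
    intro x
    rw [hFN, hfovn, List.mem_append, List.mem_filter]
    simp
  have hB : ∀ x, ((!(FN.contains x)) && !(R.contains x)) = !(R'.contains x) := by
    intro x
    by_cases hxR' : x ∈ R'
    · have := (hR' x).mp hxR'
      rcases this with h | h | h
      · simp [hxR', h]
      · by_cases hxR : x ∈ R
        · simp [hxR', hxR]
        · have : x ∈ FN := (hmemFN x).mpr (Or.inl ⟨h, hxR⟩)
          simp [hxR', this]
      · have : x ∈ FN := (hmemFN x).mpr (Or.inr h)
        simp [hxR', this]
    · have hxR : x ∉ R := fun h => hxR' ((hR' x).mpr (Or.inl h))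
      have hxFN : x ∉ FN := by
        intro h
        rcases (hmemFN x).mp h with ⟨h1, _⟩ | h1
        · exact hxR' ((hR' x).mpr (Or.inr (Or.inl h1)))
        · exact hxR' ((hR' x).mpr (Or.inr (Or.inr h1)))
      simp [hxR', hxR, hxFN]
  apply PySem.Dict.ext
  show (((pvFilter R D0).items.filter (fun p => !(FN.contains p.1))).map
      (fun p => (p.1, PySem.Dict.mk (p.2.items.filter (fun q => !(FN.contains q.1))))))
    = (pvFilter R' D0).items
  rw [pv_filter_items R D0, pv_filter_items R' D0]
  rw [List.filter_map, List.map_map]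
  have hcomp1 : ((fun p : String × PySem.Dict String Int => !(FN.contains p.1)) ∘
      (fun p : String × PySem.Dict String Int => (p.1, pvSub R p.2)))
      = fun p : String × PySem.Dict String Int => !(FN.contains p.1) := rfl
  rw [hcomp1, List.filter_filter]
  have hfcongr : D0.items.filter (fun a => !(FN.contains a.1) && !(R.contains a.1))
      = D0.items.filter (fun p => !(R'.contains p.1)) :=
    List.filter_congr (fun a _ => hB a.1)
  rw [hfcongr]
  apply List.map_congr_left
  intro p _
  simp only [Function.comp_apply]
  congr 1
  show PySem.Dict.mk ((pvSub R p.2).items.filter (fun q => !(FN.contains q.1))) = pvSub R' p.2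
  simp only [pvSub]
  congr 1
  rw [List.filter_filter]
  exact List.filter_congr (fun q _ => hB q.1)

-- B's scan is a fold over the alive nodes
lemma pv_scanB_eq (nodes : List String) (removed : PySem.Set String) (cnt : PySem.Dict String Int) :
    pvScanB nodes removed cnt
      = (nodes.filter (fun k => !(removed.contains k))).foldl
          (fun acc k => if decide (cnt.getD k 0 > acc.2) then (some k, cnt.getD k 0) else acc)
          ((none : Option String), (-1 : Int)) := by
  simp only [pvScanB]
  have hfun : (fun (acc : Option String × Int) k =>
      if (!(PySem.Set.contains removed k) && decide (cnt.getD k 0 > acc.2)) then (some k, cnt.getD k 0) else acc)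
      = (fun (acc : Option String × Int) k =>
      if (!(PySem.Set.contains removed k)) then
        (if decide (cnt.getD k 0 > acc.2) then (some k, cnt.getD k 0) else acc) else acc) := by
    funext acc k
    by_cases h : k ∈ removed <;> simp [h]
  rw [hfun, PySem.List.foldl_if_eq_foldl_filter]

-- the bisimulation between A's loop and B's loop
lemma pv_loop_eq (D0 : PySem.Dict String (PySem.Dict String Int)) (hnd : D0.keys.Nodup)
    (hsub : ∀ k, (pvFov D0 k).Nodup)
    (fovd : PySem.Dict String (List String)) (hfov : ∀ k ∈ D0.keys, fovd.getD k [] = pvFov D0 k)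
    (rev : PySem.Dict String (List String))
    (hrev : ∀ r k, k ∈ D0.keys →
      ((rev.getD r []).count k : Int) = if (pvFov D0 k).contains r then 1 else 0)
    (n_min : Int) :
    ∀ (fuel : Nat) (R : PySem.Set String) (cnt : PySem.Dict String Int) (acc : List String),
      (∀ k ∈ D0.keys, cnt.getD k 0 = pvV D0 R k) →
      pvLoopA fuel (pvFilter R D0) n_min acc = pvLoopB D0.keys fovd rev n_min fuel R cnt acc := by
  intro fuel
  induction fuel with
  | zero => intros; rfl
  | succ f ih =>
    intro R cnt acc hinv
    simp only [pvLoopA, pvLoopB]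
    have hckeys : (compute_exceed_counts (pvFilter R D0)).keys
        = D0.keys.filter (fun k => !(List.contains R k)) := by
      rw [pv_counts_keys _ (pv_nodup_keys_filter hnd R), pv_keys_filter]
    rw [pv_scanB_eq]
    simp only [PySem.Set.contains_eq_listContains]
    cases he : D0.keys.filter (fun k => !(List.contains R k)) with
    | nil =>
      rw [hckeys, he]
      simp [PySem.List.max?]
    | cons k0 t =>
      have hmem_alive : ∀ x ∈ (k0 :: t), x ∈ D0.keys ∧ List.contains R x = false := by
        intro x hx
        rw [← he] at hx
        rcases List.mem_filter.mp hx with ⟨h1, h2⟩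
        exact ⟨h1, by simpa using h2⟩
      have hkey_eq : ∀ x ∈ (k0 :: t),
          (compute_exceed_counts (pvFilter R D0)).getD x 0 = cnt.getD x 0 := by
        intro x hx
        obtain ⟨h1, h2⟩ := hmem_alive x hx
        rw [pv_counts_filter_getD hnd R h1 h2, hinv x h1]
      -- the chosen maximum on both sides
      rw [hckeys, he]
      rw [pv_max_cons (fun k => (compute_exceed_counts (pvFilter R D0)).getD k 0) k0 t]
      have h0 : (0 : Int) ≤ cnt.getD k0 0 := by
        obtain ⟨h1, _⟩ := hmem_alive k0 (by simp)
        rw [hinv k0 h1]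
        simp [pvV]
      rw [pv_scan_cons (fun k => cnt.getD k 0) k0 t h0]
      have hrun : pvRun (fun k => (compute_exceed_counts (pvFilter R D0)).getD k 0) t k0
          = pvRun (fun k => cnt.getD k 0) t k0 :=
        pv_run_congr _ _ t k0 hkey_eq
      rw [hrun]
      set m := pvRun (fun k => cnt.getD k 0) t k0 with hm
      have hmmem : m ∈ (k0 :: t) := pv_run_mem _ t k0
      obtain ⟨hmk, hmR⟩ := hmem_alive m hmmem
      have hval : (compute_exceed_counts (pvFilter R D0)).getD m 0 = cnt.getD m 0 :=
        hkey_eq m hmmem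
      simp only [hval]
      by_cases hlt : cnt.getD m 0 < n_min
      · rw [if_pos hlt, if_pos hlt]
      · rw [if_neg hlt, if_neg hlt]
        -- the removal round
        have hL : fovd.getD m [] ++ [m] = pvFov D0 m ++ [m] := by rw [hfov m hmk]
        have hfst : ((fovd.getD m [] ++ [m]).foldl (pvRemoveB rev) (R, cnt)).1
            = (fovd.getD m [] ++ [m]).foldl PySem.Set.add R := pv_remove_fst rev _ R cnt
        have hR' : ∀ x, x ∈ ((fovd.getD m [] ++ [m]).foldl (pvRemoveB rev) (R, cnt)).1
            ↔ (x ∈ R ∨ x ∈ pvFov D0 m ∨ x = m) := by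
          intro x
          rw [hfst, hL, pv_mem_foldl_add]
          simp [List.mem_append]
        have hstep := pv_step_eq D0 hnd R m hmk hmR
          ((fovd.getD m [] ++ [m]).foldl (pvRemoveB rev) (R, cnt)).1 hR'
        rw [hstep]
        apply ih
        exact pv_remove_inv D0 rev hsub hrev (fovd.getD m [] ++ [m]) R cnt hinv

theorem pv_main : ∀ (exceed_all : List (String × List (String × Int))) (n_min : Int),
    assign_elevation_sensor_nodes exceed_all n_min = assign_elevation_sensor_nodes_alt exceed_all n_min := by
  intro xa n
  simp only [assign_elevation_sensor_nodes, assign_elevation_sensor_nodes_alt]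
  have hnd : (pvDictA xa).keys.Nodup := by
    simp only [pvDictA]; exact PySem.Dict.nodup_keys_ofList _
  have hsub := pv_sub_nodup xa
  have hfov : ∀ k ∈ (pvDictA xa).keys,
      (((pvDictA xa).items.foldl (fun f p => f.insert p.1 p.2.keys) PySem.Dict.empty).getD k [])
        = pvFov (pvDictA xa) k := fun k hk => pv_fovd_getD (pvDictA xa) hnd hk
  have hrev := pv_rev_count (pvDictA xa) hnd hsub _ hfov
  have hinv : ∀ k ∈ (pvDictA xa).keys,
      (((pvDictA xa).keys.foldl (fun c k => c.insert k (PySem.List.len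
        (((pvDictA xa).items.foldl (fun f p => f.insert p.1 p.2.keys) PySem.Dict.empty).getD k [])))
        PySem.Dict.empty).getD k 0) = pvV (pvDictA xa) PySem.Set.empty k :=
    fun k hk => pv_cnt0 (pvDictA xa) hnd _ hfov hk
  have H := pv_loop_eq (pvDictA xa) hnd hsub _ hfov _ hrev n (xa.length + 1)
    PySem.Set.empty _ [] hinv
  rw [show pvFilter PySem.Set.empty (pvDictA xa) = pvDictA xa from pv_filter_nil _] at H
  exact H

-- ===== VERDICT (by name: the statement is the Claim_ definition above) =====
theorem assign_elevation_sensor_nodes_spec : Claim_equal_assign_elevation_sensor_nodes := by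
  intro exceed_all n_min _
  exact pv_main exceed_all n_min
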